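-- pv_equiv track=rewrite | github.com/viktorhollanders/python | week9/document-retrieval.py | list_of_documents
-- ===== SOURCE A (Python) =====
-- def list_of_documents(a_list: list[str]):
--     """
--     This function takes a list of documents and splits them in to a list of the n number of document. Each document in the list is one long string.
--     """
--     DELIMITER = "<END OF DOCUMENT>"
--
--     documents = []
--     current_document = ""
--
--     for item in a_list:
--         if DELIMITER in item:
--             documents.append(current_document.strip(" "))
--             current_document = ""
--         else:
--             current_document += item
--     if current_document:
--         documents.append(current_document)
--
--     return documents
-- ===== SOURCE B (Python) =====
-- def list_of_documents(a_list: list[str]):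
--     """
--     Chunk-at-a-time rewrite: scan forward to the next item containing the
--     delimiter, emit the joined slice before it (stripped of spaces), and
--     finally append the unstripped trailing join if non-empty.
--     """
--     DELIMITER = "<END OF DOCUMENT>"
--     docs = []
--     i = 0
--     n = len(a_list)
--     while True:
--         j = i
--         while j < n and DELIMITER not in a_list[j]:
--             j += 1
--         if j == n:
--             break
--         docs.append("".join(a_list[i:j]).strip(" "))
--         i = j + 1
--     trailing = "".join(a_list[i:])
--     if trailing:
--         docs.append(trailing)
--     return docs
-- ===== Notes on version B (the rewrite author's own statement) =====
-- stated objective: alternative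
-- what changed: Replaces A's accumulate-as-you-go pass (growing a current_document string item by item) with a chunked scan that finds the next delimiter item, joins the whole slice before it at once, and joins the trailing slice once at the end.
import Mathlib
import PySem

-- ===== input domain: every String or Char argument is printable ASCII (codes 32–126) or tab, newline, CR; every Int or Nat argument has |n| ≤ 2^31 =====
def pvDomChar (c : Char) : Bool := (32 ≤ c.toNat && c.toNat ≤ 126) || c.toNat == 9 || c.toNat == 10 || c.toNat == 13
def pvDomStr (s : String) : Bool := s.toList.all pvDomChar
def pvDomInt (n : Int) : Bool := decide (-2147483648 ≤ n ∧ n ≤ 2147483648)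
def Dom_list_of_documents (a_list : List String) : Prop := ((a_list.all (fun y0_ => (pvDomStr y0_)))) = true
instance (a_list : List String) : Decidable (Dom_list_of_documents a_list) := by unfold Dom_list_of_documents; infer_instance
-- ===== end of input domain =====

-- B replaces A's accumulate-as-you-go pass (growing current_document item by item)
-- with a chunked scan: find the next delimiter item, join the whole slice before it
-- at once, then the trailing slice; same cost, genuinely different decomposition.


-- ===== PORT A =====
-- one loop step of A: on a delimiter item flush current_document.strip(" "), else current_document += item
def pvStepA (st : List String × String) (item : String) : List String × String :=
  if PySem.Str.isIn "<END OF DOCUMENT>" item then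
    (st.1 ++ [PySem.Str.stripChars st.2 " "], "")
  else
    (st.1, st.2 ++ item)

def list_of_documents (a_list : List String) : List String :=
  let p := a_list.foldl pvStepA ([], "")
  if p.2 ≠ "" then p.1 ++ [p.2] else p.1

-- ===== PORT B =====
-- B's inner while loop: advance j to the first item containing the delimiter;
-- returns (the slice a_list[i:j], some (rest after j)) or (the whole suffix, none)
def pvSplitFirst (xs : List String) : List String × Option (List String) :=
  match xs with
  | [] => ([], none)
  | x :: rest =>
    if PySem.Str.isIn "<END OF DOCUMENT>" x then ([], some rest)
    else
      let p := pvSplitFirst rest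
      (x :: p.1, p.2)

-- termination measure for pvAltGo (the port needs it; cited in decreasing_by)
theorem pvSplitFirst_rest_length : ∀ (xs seg : List String) (rest : List String),
    pvSplitFirst xs = (seg, some rest) → rest.length < xs.length := by
  intro xs
  induction xs with
  | nil => intro seg rest h; simp [pvSplitFirst] at h
  | cons x t ih =>
    intro seg rest h
    unfold pvSplitFirst at h
    by_cases hd : PySem.Str.isIn "<END OF DOCUMENT>" x = true
    · rw [if_pos hd] at h
      injection h with _ h2
      injection h2 with h2
      subst h2; simp
    · rw [if_neg hd] at h
      injection h with _ h2
      have := ih _ _ (Prod.ext rfl h2)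
      simp
      omega

-- B's outer while loop: emit one joined, space-stripped chunk per delimiter item,
-- then append the unstripped trailing join if non-empty
def pvAltGo (xs : List String) : List String :=
  match h : pvSplitFirst xs with
  | (seg, none) =>
    let t := PySem.Str.join "" seg
    if t ≠ "" then [t] else []
  | (seg, some rest) =>
    PySem.Str.stripChars (PySem.Str.join "" seg) " " :: pvAltGo rest
termination_by xs.length
decreasing_by exact pvSplitFirst_rest_length xs seg rest h

def list_of_documents_alt (a_list : List String) : List String := pvAltGo a_list

-- ===== PRECONDITION & SPEC =====
def Spec_list_of_documents (a_list : List String) (out : List String) : Prop := out = list_of_documents_alt a_list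
instance (a_list : List String) (out : List String) : Decidable (Spec_list_of_documents a_list out) := by unfold Spec_list_of_documents; infer_instance

-- ===== CLAIM (what is proved, stated in full; the proofs are below) =====
def Claim_equal_list_of_documents : Prop := ∀ (a_list : List String), Dom_list_of_documents a_list → Spec_list_of_documents a_list (list_of_documents a_list)

-- ===== LEMMAS AND PROOFS =====

theorem chars_join_nil (l : List (List Char)) : PySem.Chars.join [] l = l.flatten := by
  induction l with
  | nil => rfl
  | cons x xs ih =>
    cases xs with
    | nil => simp [PySem.Chars.join, List.intercalate]
    | cons y ys =>
      simp only [PySem.Chars.join, List.intercalate, List.intersperse] at *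
      simp_all

theorem str_join_nil_nil : PySem.Str.join "" ([] : List String) = "" := rfl

theorem str_join_nil_cons (x : String) (l : List String) :
    PySem.Str.join "" (x :: l) = x ++ PySem.Str.join "" l := by
  simp [PySem.Str.join, chars_join_nil, String.ofList_append, String.ofList_toList]

-- B's chunk recursion with a pending prefix `cur` (A's current_document) still to be joined in
def pvGoWith (cur : String) (xs : List String) : List String :=
  match pvSplitFirst xs with
  | (seg, none) =>
    let t := cur ++ PySem.Str.join "" seg
    if t ≠ "" then [t] else []
  | (seg, some rest) =>
    PySem.Str.stripChars (cur ++ PySem.Str.join "" seg) " " :: pvAltGo rest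

theorem pvGoWith_empty (xs : List String) : pvGoWith "" xs = pvAltGo xs := by
  unfold pvGoWith
  conv_rhs => rw [pvAltGo]
  rcases h : pvSplitFirst xs with ⟨seg, r⟩
  cases r <;> simp [String.empty_append]

theorem pvGoWith_cons_delim (x : String) (rest : List String) (cur : String)
    (hd : PySem.Str.isIn "<END OF DOCUMENT>" x = true) :
    pvGoWith cur (x :: rest) = PySem.Str.stripChars cur " " :: pvAltGo rest := by
  unfold pvGoWith
  simp only [pvSplitFirst]
  rw [if_pos hd]
  simp [str_join_nil_nil, String.append_empty]

theorem pvGoWith_cons_nodelim (x : String) (rest : List String) (cur : String)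
    (hd : ¬ PySem.Str.isIn "<END OF DOCUMENT>" x = true) :
    pvGoWith cur (x :: rest) = pvGoWith (cur ++ x) rest := by
  conv_lhs => rw [pvGoWith]
  conv_rhs => rw [pvGoWith]
  simp only [pvSplitFirst]
  rw [if_neg hd]
  rcases h : pvSplitFirst rest with ⟨seg, r⟩
  cases r <;> simp [str_join_nil_cons, String.append_assoc]

-- A's trailing `if current_document: documents.append(current_document)` as a function of the loop state
def pvFinA (p : List String × String) : List String :=
  if p.2 ≠ "" then p.1 ++ [p.2] else p.1

theorem pvFoldA_eq_goWith : ∀ (xs : List String) (docs : List String) (cur : String),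
    pvFinA (xs.foldl pvStepA (docs, cur)) = docs ++ pvGoWith cur xs := by
  intro xs
  induction xs with
  | nil =>
    intro docs cur
    simp only [List.foldl_nil]
    unfold pvFinA pvGoWith
    simp only [pvSplitFirst]
    simp [str_join_nil_nil, String.append_empty]
    split <;> simp
  | cons x rest ih =>
    intro docs cur
    rw [List.foldl_cons]
    by_cases hd : PySem.Str.isIn "<END OF DOCUMENT>" x = true
    · have hstep : pvStepA (docs, cur) x = (docs ++ [PySem.Str.stripChars cur " "], "") := by
        unfold pvStepA; rw [if_pos hd]
      rw [hstep, ih, pvGoWith_empty, pvGoWith_cons_delim x rest cur hd]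
      simp
    · have hstep : pvStepA (docs, cur) x = (docs, cur ++ x) := by
        unfold pvStepA; rw [if_neg hd]
      rw [hstep, ih, pvGoWith_cons_nodelim x rest cur hd]

-- ===== VERDICT (by name: the statement is the Claim_ definition above) =====
theorem list_of_documents_spec : Claim_equal_list_of_documents := by
  intro a_list _
  show list_of_documents a_list = list_of_documents_alt a_list
  show pvFinA (a_list.foldl pvStepA ([], "")) = pvAltGo a_list
  rw [pvFoldA_eq_goWith, pvGoWith_empty]
  simp
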